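-- pv_equiv track=rewrite | github.com/burcam/AoC | 2023/7.py | update_hand
-- ===== SOURCE A (Python) =====
-- from enum import Enum
--
-- class HandTypes(int, Enum):
--     high=0
--     pair=1
--     twopair=2
--     three=3
--     full=4
--     four=5
--     five=6
--
-- def update_hand(type: HandTypes, hand: str):
--     j = 0
--     for h in hand:
--         if h == "J":
--             j+=1
--     # 4-kind
--     if type == HandTypes.four:
--         return HandTypes.five
--
--     # 3-kind
--     if type == HandTypes.three:
--         if j == 1:
--             return HandTypes.four
--         return HandTypes.five
--     # pair
--     if type == HandTypes.pair:
--         if j == 1: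
--             return HandTypes.three
--         if j == 2:
--             return HandTypes.four
--         return HandTypes.five
--     #high
--     if type == HandTypes.high:
--         if j == 1:
--             return HandTypes.pair
--         if j == 2:
--             return HandTypes.three
--         if j == 3:
--             return HandTypes.four
--         return HandTypes.five
--     #two pair
--     return HandTypes.full
-- ===== SOURCE B (Python) =====
-- from enum import Enum
--
-- class HandTypes(int, Enum):
--     high=0
--     pair=1
--     twopair=2
--     three=3
--     full=4
--     four=5
--     five=6
--
-- # The upgradable types form a ladder high -> pair -> three -> four -> five;
-- # each joker climbs one rung (capped at five), no jokers jumps straight to five,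
-- # and every non-ladder type collapses to full.
-- _LADDER = (HandTypes.high, HandTypes.pair, HandTypes.three, HandTypes.four, HandTypes.five)
--
-- def update_hand(type: HandTypes, hand: str):
--     if type not in _LADDER[:4]:
--         return HandTypes.full
--     j = hand.count("J")
--     if j == 0:
--         return HandTypes.five
--     return _LADDER[min(_LADDER.index(type) + j, 4)]
-- ===== Notes on version B (the rewrite author's own statement) =====
-- stated objective: simpler
-- what changed: Replaces A's per-type if/else cascade over joker counts with a ladder tuple (high,pair,three,four,five): the result is ladder[min(index(type)+jokers, 4)], with j==0 jumping to five and non-ladder types collapsing to full; jokers counted by str.count instead of a char loop.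
import Mathlib
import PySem

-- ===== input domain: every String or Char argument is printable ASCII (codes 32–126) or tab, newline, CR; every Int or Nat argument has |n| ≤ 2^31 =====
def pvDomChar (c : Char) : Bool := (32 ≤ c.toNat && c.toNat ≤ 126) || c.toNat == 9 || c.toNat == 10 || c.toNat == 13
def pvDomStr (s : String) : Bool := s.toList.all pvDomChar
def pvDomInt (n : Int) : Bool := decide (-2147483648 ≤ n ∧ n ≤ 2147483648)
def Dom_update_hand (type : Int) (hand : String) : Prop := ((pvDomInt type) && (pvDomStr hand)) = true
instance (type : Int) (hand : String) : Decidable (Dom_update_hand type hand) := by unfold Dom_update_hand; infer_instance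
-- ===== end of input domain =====

-- B replaces A's per-type if/else cascade with a ladder-table lookup: result = ladder[min(index(type)+jokers, 4)] (objective: simpler).


-- ===== PORT A =====
-- HandTypes values: high=0 pair=1 twopair=2 three=3 full=4 four=5 five=6
def update_hand (type : Int) (hand : String) : Int :=
  let j : Int := hand.toList.foldl (fun acc h => if h == 'J' then acc + 1 else acc) 0
  if type = 5 then 6                      -- 4-kind -> five
  else if type = 3 then                   -- 3-kind
    if j = 1 then 5 else 6
  else if type = 1 then                   -- pair
    if j = 1 then 3 else if j = 2 then 5 else 6
  else if type = 0 then                   -- high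
    if j = 1 then 1 else if j = 2 then 3 else if j = 3 then 5 else 6
  else 4                                  -- two pair (and everything else) -> full

-- ===== PORT B =====
-- the ladder high -> pair -> three -> four -> five, by HandTypes value
def ladder : List Int := [0, 1, 3, 5, 6]

def update_hand_alt (type : Int) (hand : String) : Int :=
  if (ladder.take 4).contains type = false then 4       -- 'type not in _LADDER[:4]' -> full
  else
    let j : Nat := PySem.Str.count hand "J"
    if j = 0 then 6                                      -- no joker left to add: already counted -> five
    else
      -- _LADDER[min(_LADDER.index(type) + j, 4)]; index is guarded by the membership test above,
      -- and min(...,4) keeps the index in range, so the two defaults are unreachable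
      (PySem.List.pyGet? ladder ((min ((PySem.List.index? ladder type).getD 0 + j) 4 : Nat) : Int)).getD 0

-- ===== PRECONDITION & SPEC =====
def Spec_update_hand (type : Int) (hand : String) (out : Int) : Prop := out = update_hand_alt type hand
instance (type : Int) (hand : String) (out : Int) : Decidable (Spec_update_hand type hand out) := by unfold Spec_update_hand; infer_instance

-- ===== CLAIM (what is proved, stated in full; the proofs are below) =====
def Claim_equal_update_hand : Prop := ∀ (type : Int) (hand : String), Dom_update_hand type hand → Spec_update_hand type hand (update_hand type hand)

-- ===== LEMMAS AND PROOFS =====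

-- counting occurrences of the one-char pattern "J" is counting the char 'J'
theorem countgo_singleton (c : Char) : ∀ (fuel : Nat) (l : List Char) (acc : Nat),
    l.length ≤ fuel → PySem.Chars.count.go [c] fuel l acc = acc + l.count c := by
  intro fuel
  induction fuel with
  | zero => intro l acc h; cases l with
    | nil => simp [PySem.Chars.count.go]
    | cons x t => simp at h
  | succ n ih =>
    intro l acc h
    cases l with
    | nil => simp [PySem.Chars.count.go]
    | cons x t =>
      simp only [PySem.Chars.count.go, List.isPrefixOf]
      by_cases hx : x = c
      · subst hx
        simp only [BEq.rfl, Bool.true_and, if_pos, List.length_cons] at *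
        rw [show ([] : List Char).length + 1 = 1 from rfl, List.drop_one, List.tail_cons,
          ih t (acc + 1) (by omega)]
        simp
        omega
      · have hcx : (c == x) = false := beq_eq_false_iff_ne.mpr (fun hc => hx hc.symm)
        simp only [hcx, Bool.false_and, Bool.false_eq_true, if_false]
        rw [ih t acc (by rw [List.length_cons] at h; omega)]
        simp [hx]

theorem strcount_J (hand : String) : PySem.Str.count hand "J" = hand.toList.count 'J' := by
  have : PySem.Chars.count hand.toList ['J'] = hand.toList.count 'J' := by
    unfold PySem.Chars.count
    simp only [List.isEmpty_cons, if_neg, Bool.false_eq_true, not_false_iff]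
    simpa using countgo_singleton 'J' hand.toList.length hand.toList 0 (le_refl _)
  simpa [PySem.Str.count] using this

theorem foldl_count_J (hand : String) :
    hand.toList.foldl (fun acc h => if h == 'J' then acc + 1 else acc) (0 : Int)
      = (hand.toList.count 'J' : Int) := by
  simpa using PySem.List.foldl_beq_add_one (l := hand.toList) (v := 'J') (a := (0 : Int))

-- both sides as a function of (type, joker count)
theorem main_eq (type : Int) (hand : String) :
    update_hand type hand = update_hand_alt type hand := by
  unfold update_hand update_hand_alt
  rw [foldl_count_J, strcount_J]
  set n : Nat := hand.toList.count 'J' with hn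
  clear_value n
  clear hn
  by_cases h5 : type = 5
  · subst h5
    have hidx : List.idxOf? (5:Int) [0,1,3,5,6] = some 3 := by decide
    rcases n with _ | _ | m
    · decide
    · decide
    · simp [hidx, ladder, PySem.List.pyGet?, PySem.List.pyIdx?,
        show min (3 + (m + 1 + 1)) 4 = 4 from by omega]
  by_cases h3 : type = 3
  · subst h3
    have hidx : List.idxOf? (3:Int) [0,1,3,5,6] = some 2 := by decide
    rcases n with _ | _ | _ | m
    · decide
    · decide
    · decide
    · simp [hidx, ladder, PySem.List.pyGet?, PySem.List.pyIdx?,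
        show min (2 + (m + 1 + 1 + 1)) 4 = 4 from by omega]; omega
  by_cases h1 : type = 1
  · subst h1
    have hidx : List.idxOf? (1:Int) [0,1,3,5,6] = some 1 := by decide
    rcases n with _ | _ | _ | _ | m
    · decide
    · decide
    · decide
    · decide
    · simp [hidx, ladder, PySem.List.pyGet?, PySem.List.pyIdx?,
        show min (1 + (m + 1 + 1 + 1 + 1)) 4 = 4 from by omega]; omega
  by_cases h0 : type = 0
  · subst h0
    have hidx : List.idxOf? (0:Int) [0,1,3,5,6] = some 0 := by decide
    rcases n with _ | _ | _ | _ | _ | m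
    · decide
    · decide
    · decide
    · decide
    · decide
    · simp [hidx, ladder, PySem.List.pyGet?, PySem.List.pyIdx?] <;> omega
  · have hmem : type ∉ ladder.take 4 := by
      simp [ladder]
      exact ⟨h0, h1, h3, h5⟩
    simp [h5, h3, h1, h0, hmem]

-- ===== VERDICT (by name: the statement is the Claim_ definition above) =====
theorem update_hand_spec : Claim_equal_update_hand := by
  intro type hand _
  unfold Spec_update_hand
  exact main_eq type hand
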